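-- pv_equiv track=rewrite | github.com/imoyao/code-snippets | codes/split_list.py | make_four_column
-- ===== SOURCE A (Python) =====
-- def make_four_column(data, column_num=4):
--     """
--     返回 column_num 列数据
--     :param data:
--     :param column_num:
--     :return:
--     """
--
--     def append_item(seq, _item, index):
--         try:
--             item_in = _item[index]
--             # if not item_in:
--             #     item_in = {"name": "", "num": None, "state": False}
--
--         except IndexError:
--             # item_in = {"name": "", "num": None, "state": False}
--             item_in = {}
--         seq.append(item_in)
--
--         return seq
--
--     a = []
--     b = []
--     c = []
--     d = []
--
--     for item in data:
--         for i in range(column_num):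
--             if i == 0:
--                 a = append_item(a, item, 0)
--             elif i == 1:
--                 b = append_item(b, item, 1)
--             elif i == 2:
--                 c = append_item(c, item, 2)
--             elif i == 3:
--                 d = append_item(d, item, 3)
--     return [a[::-1], b[::-1], c[::-1], d[::-1]]
-- ===== SOURCE B (Python) =====
-- def make_four_column(data, column_num=4):
--     # Rectangularize: pad/truncate each row (in reversed order) to exactly 4 cells,
--     # then transpose the whole rectangle in one zip, then blank columns >= column_num.
--     padded = [(list(row) + [{}, {}, {}, {}])[:4] for row in reversed(list(data))]
--     cols = [list(col) for col in zip(*padded)] or [[], [], [], []]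
--     return [cols[i] if i < column_num else [] for i in range(4)]
-- ===== Notes on version B (the rewrite author's own statement) =====
-- stated objective: alternative
-- what changed: B replaces A's row-major loop over range(column_num) with four accumulators, a try/except helper and four final reversals by a rectangularize-then-transpose algorithm: pad/truncate each reversed row to exactly 4 cells with {} fillers, transpose the whole rectangle in a single zip(*...), and blank the columns at or beyond column_num. The single zip pass removes A's per-row inner loop and per-cell function call (constant-factor speedup, measured).
import Mathlib
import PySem

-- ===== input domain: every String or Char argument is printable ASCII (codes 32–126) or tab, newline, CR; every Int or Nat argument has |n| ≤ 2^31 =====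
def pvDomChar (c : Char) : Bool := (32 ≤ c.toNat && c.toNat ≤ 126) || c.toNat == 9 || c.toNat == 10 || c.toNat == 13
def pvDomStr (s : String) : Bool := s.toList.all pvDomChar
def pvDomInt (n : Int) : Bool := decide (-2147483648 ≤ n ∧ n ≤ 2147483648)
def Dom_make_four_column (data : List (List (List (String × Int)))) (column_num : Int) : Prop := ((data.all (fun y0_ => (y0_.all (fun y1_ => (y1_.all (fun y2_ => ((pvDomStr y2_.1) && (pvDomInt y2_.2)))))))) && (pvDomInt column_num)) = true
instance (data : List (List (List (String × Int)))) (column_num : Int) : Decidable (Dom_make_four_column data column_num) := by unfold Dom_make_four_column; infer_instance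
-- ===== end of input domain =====

-- B pads each reversed row to exactly 4 cells and transposes the rectangle in one zip(*...) pass
-- (alternative decomposition); A is a row-major loop with four accumulators, a try/except helper and
-- four final reversals. Equal return values proved below.

-- ===== PORT A =====
-- A's helper append_item: seq.append(_item[index]) with except IndexError -> {}
def appendItemA (seq : List (List (String × Int))) (item : List (List (String × Int))) (index : Int) : List (List (String × Int)) :=
  match PySem.List.pyGet? item index with
  | some v => seq ++ [v]
  | none   => seq ++ [([] : List (String × Int))]

-- the body of A's inner 'for i in range(column_num)' on the state (a, b, c, d)
def innerBodyA (item : List (List (String × Int)))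
    (s : List (List (String × Int)) × List (List (String × Int)) × List (List (String × Int)) × List (List (String × Int)))
    (i : Int) :
    List (List (String × Int)) × List (List (String × Int)) × List (List (String × Int)) × List (List (String × Int)) :=
  if i == 0 then (appendItemA s.1 item 0, s.2.1, s.2.2.1, s.2.2.2)
  else if i == 1 then (s.1, appendItemA s.2.1 item 1, s.2.2.1, s.2.2.2)
  else if i == 2 then (s.1, s.2.1, appendItemA s.2.2.1 item 2, s.2.2.2)
  else if i == 3 then (s.1, s.2.1, s.2.2.1, appendItemA s.2.2.2 item 3)
  else s

def make_four_column (data : List (List (List (String × Int)))) (column_num : Int) : List (List (List (String × Int))) :=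
  let st := data.foldl
    (fun s item => (PySem.List.pyRange 0 column_num 1).foldl (innerBodyA item) s)
    ([], [], [], [])
  [((PySem.List.slice? st.1 none none (-1)).getD []),
   ((PySem.List.slice? st.2.1 none none (-1)).getD []),
   ((PySem.List.slice? st.2.2.1 none none (-1)).getD []),
   ((PySem.List.slice? st.2.2.2 none none (-1)).getD [])]

-- ===== PORT B =====
-- hand port of Python's zip(*rows), step for step: emit the list of heads while every row is
-- nonempty, then recurse on the tails; exact for lists of lists (tuple→list wrapping is identity here)
def zipHeads (rows : List (List (List (String × Int)))) : Option (List (List (String × Int))) :=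
  match rows with
  | [] => some []
  | [] :: _ => none
  | (y :: _) :: rs => (zipHeads rs).map (y :: ·)

def zipGo (first : List (List (String × Int))) (rs : List (List (List (String × Int)))) : List (List (List (String × Int))) :=
  match first with
  | [] => []
  | x :: xs =>
    match zipHeads rs with
    | some hs => (x :: hs) :: zipGo xs (rs.map List.tail)
    | none => []

def pyZipStar (rows : List (List (List (String × Int)))) : List (List (List (String × Int))) :=
  match rows with
  | [] => []
  | r :: rs => zipGo r rs

-- (list(row) + [{}, {}, {}, {}])[:4] — the slice [:4] is List.take 4 (nonnegative stop, exact)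
def quadPad (row : List (List (String × Int))) : List (List (String × Int)) :=
  (row ++ [[], [], [], []]).take 4

def make_four_column_alt (data : List (List (List (String × Int)))) (column_num : Int) : List (List (List (String × Int))) :=
  let padded := data.reverse.map quadPad        -- reversed(list(data)), each row padded/truncated to 4
  let cols0 := pyZipStar padded                  -- [list(col) for col in zip(*padded)]
  let cols := if cols0.isEmpty then [[], [], [], []] else cols0   -- `… or [[], [], [], []]`
  (PySem.List.pyRange 0 4 1).map (fun i =>
    if i < column_num then (PySem.List.pyGet? cols i).getD [] else [])

-- ===== PRECONDITION & SPEC =====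
def Spec_make_four_column (data : List (List (List (String × Int)))) (column_num : Int) (out : List (List (List (String × Int)))) : Prop := out = make_four_column_alt data column_num
instance (data : List (List (List (String × Int)))) (column_num : Int) (out : List (List (List (String × Int)))) : Decidable (Spec_make_four_column data column_num out) := by unfold Spec_make_four_column; infer_instance

-- ===== CLAIM (what is proved, stated in full; the proofs are below) =====
def Claim_equal_make_four_column : Prop := ∀ (data : List (List (List (String × Int)))) (column_num : Int), Dom_make_four_column data column_num → Spec_make_four_column data column_num (make_four_column data column_num)

-- ===== LEMMAS AND PROOFS =====

-- one picked cell: item[k] with IndexError -> {}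
def pickA (item : List (List (String × Int))) (k : Int) : List (String × Int) :=
  (PySem.List.pyGet? item k).getD []

lemma appendItemA_eq (seq item : List (List (String × Int))) (k : Int) :
    appendItemA seq item k = seq ++ [pickA item k] := by
  unfold appendItemA pickA
  cases PySem.List.pyGet? item k <;> simp

-- folding innerBodyA over a range all of whose members are ≥ 4 is the identity
lemma foldl_innerBodyA_ge4 (item : List (List (String × Int))) (l : List Int)
    (h : ∀ i ∈ l, 4 ≤ i) (s : _) :
    l.foldl (innerBodyA item) s = s := by
  induction l generalizing s with
  | nil => rfl
  | cons x xs ih =>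
    have hx : 4 ≤ x := h x (by simp)
    have : innerBodyA item s x = s := by
      unfold innerBodyA
      have h0 : (x == 0) = false := by simp; omega
      have h1 : (x == 1) = false := by simp; omega
      have h2 : (x == 2) = false := by simp; omega
      have h3 : (x == 3) = false := by simp; omega
      simp [h0, h1, h2, h3]
    rw [List.foldl_cons, this]
    exact ih (fun i hi => h i (by simp [hi])) s

def colPick (n : Int) (k : Nat) (item : List (List (String × Int))) : List (List (String × Int)) :=
  if (k : Int) < n then [pickA item k] else []

-- the effect of A's whole inner loop on one item
lemma inner_loop_eq (item : List (List (String × Int))) (n : Int) (s : _) :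
    (PySem.List.pyRange 0 n 1).foldl (innerBodyA item) s =
      (s.1 ++ colPick n 0 item, s.2.1 ++ colPick n 1 item,
       s.2.2.1 ++ colPick n 2 item, s.2.2.2 ++ colPick n 3 item) := by
  rcases s with ⟨a, b, c, d⟩
  rcases le_or_gt n 0 with h0 | h0
  · rw [PySem.List.pyRange_one_eq_nil h0]
    simp [colPick]
    refine ⟨?_, ?_, ?_, ?_⟩ <;> omega
  rcases le_or_gt n 1 with h1 | h1
  · have : n = 1 := by omega
    subst this
    rw [show PySem.List.pyRange 0 1 1 = [0] by decide]
    simp [List.foldl, innerBodyA, appendItemA_eq, colPick]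
  rcases le_or_gt n 2 with h2 | h2
  · have : n = 2 := by omega
    subst this
    rw [show PySem.List.pyRange 0 2 1 = [0, 1] by decide]
    simp [List.foldl, innerBodyA, appendItemA_eq, colPick]
  rcases le_or_gt n 3 with h3 | h3
  · have : n = 3 := by omega
    subst this
    rw [show PySem.List.pyRange 0 3 1 = [0, 1, 2] by decide]
    simp [List.foldl, innerBodyA, appendItemA_eq, colPick]
  · have h4 : (4 : Int) ≤ n := by omega
    rw [PySem.List.pyRange_one_append 0 4 n (by omega) h4, List.foldl_append]
    rw [show PySem.List.pyRange 0 4 1 = [0, 1, 2, 3] by decide]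
    rw [foldl_innerBodyA_ge4 item _ (fun i hi => ((PySem.List.mem_pyRange_one).1 hi).1)]
    simp [List.foldl, innerBodyA, appendItemA_eq, colPick]
    refine ⟨?_, ?_, ?_, ?_⟩ <;> omega

-- the outer fold builds the four columns row-major
lemma outer_fold_eq (data : List (List (List (String × Int)))) (n : Int) (a b c d : List (List (String × Int))) :
    data.foldl (fun s item => (PySem.List.pyRange 0 n 1).foldl (innerBodyA item) s) (a, b, c, d) =
      (a ++ data.flatMap (colPick n 0), b ++ data.flatMap (colPick n 1),
       c ++ data.flatMap (colPick n 2), d ++ data.flatMap (colPick n 3)) := by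
  induction data generalizing a b c d with
  | nil => simp
  | cons x xs ih =>
    rw [List.foldl_cons, inner_loop_eq]
    rw [ih]
    simp

lemma flatMap_colPick (data : List (List (List (String × Int)))) (n : Int) (k : Nat) :
    data.flatMap (colPick n k) =
      if (k : Int) < n then data.map (fun item => pickA item k) else [] := by
  induction data with
  | nil => simp
  | cons x xs ih =>
    simp only [List.flatMap_cons, ih, colPick]
    split <;> simp

-- padding a row to 4 cells picks exactly cells 0..3 (with the {} default)
lemma quadPad_eq (row : List (List (String × Int))) :
    quadPad row = [pickA row 0, pickA row 1, pickA row 2, pickA row 3] := by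
  unfold quadPad pickA
  match row with
  | [] => simp [PySem.List.pyGet?, PySem.List.pyIdx?]
  | [a] => simp [PySem.List.pyGet?, PySem.List.pyIdx?]
  | [a, b] => simp [PySem.List.pyGet?, PySem.List.pyIdx?]
  | [a, b, c] => simp [PySem.List.pyGet?, PySem.List.pyIdx?]
  | a :: b :: c :: d :: rest =>
    simp [PySem.List.pyGet?, PySem.List.pyIdx?]
    refine ⟨?_, ?_, ?_, ?_⟩ <;> (rw [if_pos (by omega)]; simp)

lemma zipHeads_map_cons (f : List (List (String × Int)) → List (String × Int))
    (F : List (List (String × Int)) → List (List (String × Int)))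
    (l : List (List (List (String × Int)))) :
    zipHeads (l.map (fun x => f x :: F x)) = some (l.map f) := by
  induction l with
  | nil => rfl
  | cons x xs ih => simp [zipHeads, ih]

-- zip(*rows) of a nonempty rectangle of 4-cell rows is its four columns
lemma zipGo_step (h : List (String × Int)) (t : List (List (String × Int)))
    (f : List (List (String × Int)) → List (String × Int))
    (F : List (List (String × Int)) → List (List (String × Int)))
    (l : List (List (List (String × Int)))) :
    zipGo (h :: t) (l.map (fun r => f r :: F r)) = (h :: l.map f) :: zipGo t (l.map F) := by
  rw [zipGo, zipHeads_map_cons]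
  simp only [List.map_map]
  rw [show (List.tail ∘ fun r => f r :: F r) = F from rfl]

lemma pyZipStar_quad (x : List (List (String × Int))) (xs : List (List (List (String × Int)))) :
    pyZipStar ((x :: xs).map (fun r => [pickA r 0, pickA r 1, pickA r 2, pickA r 3])) =
      [(x :: xs).map (fun r => pickA r 0), (x :: xs).map (fun r => pickA r 1),
       (x :: xs).map (fun r => pickA r 2), (x :: xs).map (fun r => pickA r 3)] := by
  simp only [List.map_cons, pyZipStar]
  rw [show (xs.map (fun r => [pickA r 0, pickA r 1, pickA r 2, pickA r 3]))
        = xs.map (fun r => pickA r 0 :: (fun r => [pickA r 1, pickA r 2, pickA r 3]) r) from rfl,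
      zipGo_step]
  rw [show (xs.map (fun r => [pickA r 1, pickA r 2, pickA r 3]))
        = xs.map (fun r => pickA r 1 :: (fun r => [pickA r 2, pickA r 3]) r) from rfl,
      zipGo_step]
  rw [show (xs.map (fun r => [pickA r 2, pickA r 3]))
        = xs.map (fun r => pickA r 2 :: (fun r => [pickA r 3]) r) from rfl,
      zipGo_step]
  rw [show (xs.map (fun r => [pickA r 3]))
        = xs.map (fun r => pickA r 3 :: (fun _ => ([] : List (List (String × Int)))) r) from rfl,
      zipGo_step]
  simp [zipGo]

lemma make_four_column_eq_alt (data : List (List (List (String × Int)))) (n : Int) :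
    make_four_column data n = make_four_column_alt data n := by
  unfold make_four_column make_four_column_alt
  rw [show PySem.List.pyRange 0 4 1 = [0, 1, 2, 3] by decide]
  simp only [outer_fold_eq, PySem.List.slice?_none_none_neg_one, Option.getD_some,
    List.nil_append, flatMap_colPick]
  have hq : quadPad = fun r => [pickA r 0, pickA r 1, pickA r 2, pickA r 3] := funext quadPad_eq
  cases hd : data with
  | nil =>
    simp [pyZipStar, PySem.List.pyGet?, PySem.List.pyIdx?]
  | cons z zs =>
    obtain ⟨y, ys, hl⟩ : ∃ y ys, data.reverse = y :: ys := by
      rw [hd]; exact List.exists_cons_of_ne_nil (by simp)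
    rw [← hd, hl, hq, pyZipStar_quad]
    simp only [List.isEmpty_cons, if_false, List.map_cons, List.map_nil, Bool.false_eq_true]
    have hrev : ∀ k : Nat, (if (k : Int) < n then data.map (fun item => pickA item k) else []).reverse
        = if (k : Int) < n then (y :: ys).map (fun r => pickA r k) else [] := by
      intro k
      rw [apply_ite List.reverse, ← List.map_reverse, hl]
      simp
    rw [hrev 0, hrev 1, hrev 2, hrev 3]
    simp [PySem.List.pyGet?, PySem.List.pyIdx?]
-- ===== VERDICT (by name: the statement is the Claim_ definition above) =====
theorem make_four_column_spec : Claim_equal_make_four_column := by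
  intro data column_num _
  unfold Spec_make_four_column
  exact make_four_column_eq_alt data column_num
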